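-- pv_equiv track=rewrite | github.com/gitgory/knotebook | scripts/js_toc.py | extract_inline_block_comments
-- ===== SOURCE A (Python) =====
-- from typing import List, Tuple
--
-- def extract_inline_block_comments(raw_line: str) -> Tuple[List[str], bool]:
--     """
--     Extract all /* ... */ comment segments from a single line.
--     Returns (extracted_segments, started_multiline_block_comment)
--     If a block comment starts but doesn't end on the same line, we treat it as multiline.
--     """
--     extracted: List[str] = []
--     line = raw_line
--     i = 0
--     while i < len(line):
--         start = line.find("/*", i)
--         if start == -1:
--             break
--         end = line.find("*/", start + 2)
--         if end == -1:
--             extracted.append(line[start:].rstrip("\n"))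
--             return extracted, True
--         extracted.append(line[start : end + 2].rstrip("\n"))
--         i = end + 2
--     return extracted, False
-- ===== SOURCE B (Python) =====
-- from typing import List, Tuple
--
-- def extract_inline_block_comments(raw_line: str) -> Tuple[List[str], bool]:
--     """
--     Single left-to-right character scan with an open/closed state machine
--     instead of repeated substring .find() calls.
--     """
--     extracted: List[str] = []
--     buf = None  # list of chars of the comment currently open, else None
--     i = 0
--     n = len(raw_line)
--     while i < n:
--         if buf is None:
--             if raw_line.startswith("/*", i):
--                 buf = ["/", "*"]
--                 i += 2
--             else:
--                 i += 1
--         else: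
--             if raw_line.startswith("*/", i):
--                 buf.append("*")
--                 buf.append("/")
--                 extracted.append("".join(buf))
--                 buf = None
--                 i += 2
--             else:
--                 buf.append(raw_line[i])
--                 i += 1
--     if buf is not None:
--         extracted.append("".join(buf).rstrip("\n"))
--         return extracted, True
--     return extracted, False
-- ===== Notes on version B (the rewrite author's own statement) =====
-- stated objective: alternative
-- what changed: Replaces A's loop of repeated str.find('/*')/str.find('*/') substring searches and slicing by a single left-to-right character scan with an inside/outside-comment state machine that accumulates the current comment's characters.
import Mathlib
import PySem

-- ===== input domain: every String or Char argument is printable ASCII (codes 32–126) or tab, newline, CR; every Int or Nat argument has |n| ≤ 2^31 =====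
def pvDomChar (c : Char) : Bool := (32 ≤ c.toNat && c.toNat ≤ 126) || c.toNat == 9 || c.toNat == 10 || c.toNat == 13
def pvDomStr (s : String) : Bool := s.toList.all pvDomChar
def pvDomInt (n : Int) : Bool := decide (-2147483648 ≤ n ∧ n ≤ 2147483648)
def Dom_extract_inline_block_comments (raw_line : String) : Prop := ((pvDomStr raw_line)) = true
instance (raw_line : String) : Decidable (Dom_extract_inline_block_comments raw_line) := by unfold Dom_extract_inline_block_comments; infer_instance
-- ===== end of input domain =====

-- B replaces A's repeated .find() loop by a single character-by-character state-machine scan; objective: alternative (same O(n) cost).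

-- Python's s.rstrip("\n") (right strip of newlines only), ported by hand (PySem has no
-- right-only strip with a character set); exact: drops exactly the trailing '\n' characters.
def pvRstripNL (s : List Char) : List Char :=
  (s.reverse.dropWhile (fun c => c = '\n')).reverse

-- ===== PORT A =====
-- A's while-loop over the scan position `i`, with the two str.find calls; `fuel` only
-- guards totality (each iteration advances `i` by ≥ 4, so `line.length + 1` never runs out).
def pvALoop (line : List Char) (fuel : Nat) (i : Int) (extracted : List (List Char)) :
    List (List Char) × Bool :=
  match fuel with
  | 0 => (extracted, false)
  | fuel' + 1 =>
    if i < (PySem.Chars.len line : Int) then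
      let start := PySem.Chars.findFrom line ['/', '*'] i none
      if start = -1 then (extracted, false)
      else
        let e := PySem.Chars.findFrom line ['*', '/'] (start + 2) none
        if e = -1 then
          (extracted ++ [pvRstripNL (PySem.Chars.slice line (some start) none)], true)
        else
          pvALoop line fuel' (e + 2)
            (extracted ++ [pvRstripNL (PySem.Chars.slice line (some start) (some (e + 2)))])
    else (extracted, false)

def extract_inline_block_comments (raw_line : String) : List String × Bool :=
  let r := pvALoop raw_line.toList (raw_line.toList.length + 1) 0 []
  (r.1.map String.mk, r.2)

-- ===== PORT B =====
-- B's single pass: outside a comment (`none`) look for "/*", inside one (`some buf`)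
-- grow the buffer until "*/"; structural transcription of Source B's index loop.
def pvRun : List Char → List (List Char) → Option (List Char) → List (List Char) × Bool
  | [], acc, none => (acc, false)
  | [], acc, some buf => (acc ++ [pvRstripNL buf], true)
  | '/' :: '*' :: rest, acc, none => pvRun rest acc (some ['/', '*'])
  | _ :: rest, acc, none => pvRun rest acc none
  | '*' :: '/' :: rest, acc, some buf => pvRun rest (acc ++ [buf ++ ['*', '/']]) none
  | c :: rest, acc, some buf => pvRun rest acc (some (buf ++ [c]))

def extract_inline_block_comments_alt (raw_line : String) : List String × Bool :=
  let r := pvRun raw_line.toList [] none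
  (r.1.map String.mk, r.2)

-- ===== PRECONDITION & SPEC =====
def Spec_extract_inline_block_comments (raw_line : String) (out : List String × Bool) : Prop := out = extract_inline_block_comments_alt raw_line
instance (raw_line : String) (out : List String × Bool) : Decidable (Spec_extract_inline_block_comments raw_line out) := by unfold Spec_extract_inline_block_comments; infer_instance

-- ===== CLAIM (what is proved, stated in full; the proofs are below) =====
def Claim_equal_extract_inline_block_comments : Prop := ∀ (raw_line : String), Dom_extract_inline_block_comments raw_line → Spec_extract_inline_block_comments raw_line (extract_inline_block_comments raw_line)

-- ===== LEMMAS AND PROOFS =====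

-- Reference shape of A's loop on the suffix still to scan (proof-only helper).
def pvRefA (s : List Char) : List (List Char) × Bool :=
  if h2 : s.length < 2 then ([], false)
  else
    if PySem.Chars.find s ['/', '*'] = -1 then ([], false)
    else
      if PySem.Chars.find (s.drop ((PySem.Chars.find s ['/', '*']).toNat + 2)) ['*', '/'] = -1 then
        ([pvRstripNL (s.drop (PySem.Chars.find s ['/', '*']).toNat)], true)
      else
        (pvRstripNL ((s.drop (PySem.Chars.find s ['/', '*']).toNat).take
            ((PySem.Chars.find (s.drop ((PySem.Chars.find s ['/', '*']).toNat + 2)) ['*', '/']).toNat + 2 + 2)) ::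
          (pvRefA ((s.drop ((PySem.Chars.find s ['/', '*']).toNat + 2)).drop
            ((PySem.Chars.find (s.drop ((PySem.Chars.find s ['/', '*']).toNat + 2)) ['*', '/']).toNat + 2))).1,
         (pvRefA ((s.drop ((PySem.Chars.find s ['/', '*']).toNat + 2)).drop
            ((PySem.Chars.find (s.drop ((PySem.Chars.find s ['/', '*']).toNat + 2)) ['*', '/']).toNat + 2))).2)
termination_by s.length
decreasing_by
  all_goals (simp only [List.length_drop]; omega)

-- find of a non-empty pattern on []
lemma pv_find_nil_op : PySem.Chars.find ([] : List Char) ['/', '*'] = -1 := by decide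
lemma pv_find_nil_cl : PySem.Chars.find ([] : List Char) ['*', '/'] = -1 := by decide

-- unfolding of pvRefA without the (termination-only) length guard
lemma pvRefA_eq (s : List Char) :
    pvRefA s =
      if PySem.Chars.find s ['/', '*'] = -1 then ([], false)
      else
        if PySem.Chars.find (s.drop ((PySem.Chars.find s ['/', '*']).toNat + 2)) ['*', '/'] = -1 then
          ([pvRstripNL (s.drop (PySem.Chars.find s ['/', '*']).toNat)], true)
        else
          (pvRstripNL ((s.drop (PySem.Chars.find s ['/', '*']).toNat).take
              ((PySem.Chars.find (s.drop ((PySem.Chars.find s ['/', '*']).toNat + 2)) ['*', '/']).toNat + 2 + 2)) ::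
            (pvRefA ((s.drop ((PySem.Chars.find s ['/', '*']).toNat + 2)).drop
              ((PySem.Chars.find (s.drop ((PySem.Chars.find s ['/', '*']).toNat + 2)) ['*', '/']).toNat + 2))).1,
           (pvRefA ((s.drop ((PySem.Chars.find s ['/', '*']).toNat + 2)).drop
              ((PySem.Chars.find (s.drop ((PySem.Chars.find s ['/', '*']).toNat + 2)) ['*', '/']).toNat + 2))).2) := by
  rw [pvRefA]
  by_cases hl : s.length < 2
  · rw [dif_pos hl]
    have hfind : PySem.Chars.find s ['/', '*'] = -1 := by
      refine (PySem.Chars.find_eq_neg_one_iff s ['/', '*']).mpr ?_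
      intro hinf
      have := hinf.length_le
      simp at this
      omega
    rw [if_pos hfind]
  · rw [dif_neg hl]

-- find s sub = 0 when sub is a prefix of s
lemma pv_find_prefix (s sub : List Char) (h : sub <+: s) : PySem.Chars.find s sub = 0 := by
  have hinf : sub <:+: s := h.isInfix
  have h0 : 0 ≤ PySem.Chars.find s sub := (PySem.Chars.find_nonneg_iff s sub).mpr hinf
  obtain ⟨h1, h2⟩ := PySem.Chars.find_spec h0
  rcases Nat.eq_zero_or_pos (PySem.Chars.find s sub).toNat with hz | hp
  · omega
  · exact absurd (by simpa using h) (h2 0 hp)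

-- find on a cons when sub is not a prefix at the head
lemma pv_find_cons (c : Char) (t sub : List Char) (h : ¬ sub <+: (c :: t)) :
    PySem.Chars.find (c :: t) sub =
      if PySem.Chars.find t sub = -1 then -1 else PySem.Chars.find t sub + 1 := by
  split_ifs with hm
  · have hn : ¬ sub <:+: t := (PySem.Chars.find_eq_neg_one_iff t sub).mp hm
    refine (PySem.Chars.find_eq_neg_one_iff (c :: t) sub).mpr ?_
    intro hinf
    obtain ⟨u, hpre, hsuf⟩ := List.infix_iff_prefix_suffix.mp hinf
    rcases List.suffix_cons_iff.mp hsuf with rfl | hsuf'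
    · exact h hpre
    · exact hn (hpre.isInfix.trans hsuf'.isInfix)
  · have h0t : 0 ≤ PySem.Chars.find t sub := by
      have := PySem.Chars.neg_one_le_find t sub
      omega
    obtain ⟨hp, hmin⟩ := PySem.Chars.find_spec h0t
    have hpc : sub <+: (c :: t).drop ((PySem.Chars.find t sub).toNat + 1) := by
      simpa using hp
    have hinf : sub <:+: (c :: t) :=
      hpc.isInfix.trans (List.drop_suffix _ _).isInfix
    have h0 : 0 ≤ PySem.Chars.find (c :: t) sub :=
      (PySem.Chars.find_nonneg_iff (c :: t) sub).mpr hinf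
    obtain ⟨hp', hmin'⟩ := PySem.Chars.find_spec h0
    have hle : (PySem.Chars.find (c :: t) sub).toNat ≤ (PySem.Chars.find t sub).toNat + 1 := by
      by_contra hq
      push_neg at hq
      exact hmin' _ hq hpc
    have hq0 : (PySem.Chars.find (c :: t) sub).toNat ≠ 0 := by
      intro h0q
      rw [h0q] at hp'
      exact h (by simpa using hp')
    have hge : (PySem.Chars.find t sub).toNat + 1 ≤ (PySem.Chars.find (c :: t) sub).toNat := by
      by_contra hq
      push_neg at hq
      obtain ⟨q', hq'⟩ : ∃ q', (PySem.Chars.find (c :: t) sub).toNat = q' + 1 :=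
        ⟨(PySem.Chars.find (c :: t) sub).toNat - 1, by omega⟩
      have hpt : sub <+: t.drop q' := by
        rw [hq'] at hp'
        simpa using hp'
      exact hmin q' (by omega) hpt
    omega

-- rstrip("\n") is the identity on a string ending in "*/"
lemma pv_rstrip_close (xs : List Char) : pvRstripNL (xs ++ ['*', '/']) = xs ++ ['*', '/'] := by
  simp [pvRstripNL]

-- step of pvRun outside a comment when "/*" does not start here
lemma pvRun_step_none (c : Char) (rest : List Char) (acc : List (List Char))
    (h : ¬ ['/', '*'] <+: (c :: rest)) :
    pvRun (c :: rest) acc none = pvRun rest acc none := by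
  rw [pvRun.eq_def]
  split <;> simp_all

-- step of pvRun inside a comment when "*/" does not start here
lemma pvRun_step_some (c : Char) (rest : List Char) (acc : List (List Char)) (buf : List Char)
    (h : ¬ ['*', '/'] <+: (c :: rest)) :
    pvRun (c :: rest) acc (some buf) = pvRun rest acc (some (buf ++ [c])) := by
  rw [pvRun.eq_def]
  split <;> simp_all

-- pvRun inside a comment, characterised by the first occurrence of "*/"
lemma pvRun_some (s : List Char) : ∀ (acc : List (List Char)) (buf : List Char),
    pvRun s acc (some buf) =
      if PySem.Chars.find s ['*', '/'] = -1 then (acc ++ [pvRstripNL (buf ++ s)], true)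
      else pvRun (s.drop ((PySem.Chars.find s ['*', '/']).toNat + 2))
             (acc ++ [buf ++ s.take ((PySem.Chars.find s ['*', '/']).toNat + 2)]) none := by
  induction s with
  | nil =>
    intro acc buf
    simp [pvRun, pv_find_nil_cl]
  | cons c rest ih =>
    intro acc buf
    by_cases hpre : ['*', '/'] <+: (c :: rest)
    · obtain ⟨u, hu⟩ := hpre
      simp only [List.cons_append, List.nil_append] at hu
      injection hu with h1 h2
      subst h1; subst h2
      rw [pv_find_prefix _ _ ⟨u, by simp⟩]
      simp [pvRun]
    · rw [pvRun_step_some c rest acc buf hpre, ih acc (buf ++ [c]),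
        pv_find_cons c rest _ hpre]
      by_cases hm : PySem.Chars.find rest ['*', '/'] = -1
      · rw [if_pos hm, if_pos hm, if_pos rfl]
        simp
      · have h0 : 0 ≤ PySem.Chars.find rest ['*', '/'] := by
          have := PySem.Chars.neg_one_le_find rest ['*', '/']
          omega
        rw [if_neg hm, if_neg hm, if_neg (by omega : ¬ PySem.Chars.find rest ['*', '/'] + 1 = -1)]
        rw [show (PySem.Chars.find rest ['*', '/'] + 1).toNat + 2
            = ((PySem.Chars.find rest ['*', '/']).toNat + 2) + 1 from by omega]
        rw [List.drop_succ_cons, List.take_succ_cons]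
        simp

lemma pvRefA_cons (c : Char) (rest : List Char) (h : ¬ ['/', '*'] <+: (c :: rest)) :
    pvRefA (c :: rest) = pvRefA rest := by
  conv_lhs => rw [pvRefA_eq]
  conv_rhs => rw [pvRefA_eq]
  rw [pv_find_cons c rest _ h]
  by_cases hm : PySem.Chars.find rest ['/', '*'] = -1
  · simp [hm]
  · have h0 : 0 ≤ PySem.Chars.find rest ['/', '*'] := by
      have := PySem.Chars.neg_one_le_find rest ['/', '*']
      omega
    obtain ⟨m, hfm⟩ : ∃ m : Nat, PySem.Chars.find rest ['/', '*'] = (m : Int) :=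
      ⟨(PySem.Chars.find rest ['/', '*']).toNat, by omega⟩
    rw [hfm]
    simp only [if_neg (by omega : ¬ ((m : Int)) = -1),
      if_neg (by omega : ¬ ((m : Int)) + 1 = -1)]
    rw [show ((m : Int) + 1).toNat = m + 1 from by omega]
    rw [show ((m : Int)).toNat = m from by omega]
    simp only [List.drop_succ_cons]

lemma pvRun_none (n : Nat) : ∀ (s : List Char), s.length ≤ n → ∀ (acc : List (List Char)),
    pvRun s acc none = (acc ++ (pvRefA s).1, (pvRefA s).2) := by
  induction n with
  | zero =>
    intro s hs acc
    have hnil : s = [] := List.eq_nil_of_length_eq_zero (by omega)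
    subst hnil
    rw [pvRefA_eq, if_pos pv_find_nil_op]
    simp [pvRun]
  | succ n ih =>
    intro s hs acc
    cases s with
    | nil =>
      rw [pvRefA_eq, if_pos pv_find_nil_op]
      simp [pvRun]
    | cons c rest =>
      by_cases hpre : ['/', '*'] <+: (c :: rest)
      · obtain ⟨u, hu⟩ := hpre
        simp only [List.cons_append, List.nil_append] at hu
        injection hu with h1 h2
        subst h1; subst h2
        have hf0 : PySem.Chars.find ('/' :: '*' :: u) ['/', '*'] = 0 :=
          pv_find_prefix _ _ ⟨u, by simp⟩
        have hstep : pvRun ('/' :: '*' :: u) acc none = pvRun u acc (some ['/', '*']) := rfl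
        rw [hstep, pvRun_some u acc ['/', '*']]
        conv_rhs => rw [pvRefA_eq]
        rw [hf0]
        rw [if_neg (by omega : ¬ (0 : Int) = -1)]
        rw [show ((0 : Int).toNat + 2) = 2 from rfl]
        rw [show ('/' :: '*' :: u).drop 2 = u from rfl]
        rw [show ((0 : Int).toNat) = 0 from rfl]
        rw [show ('/' :: '*' :: u).drop 0 = '/' :: '*' :: u from rfl]
        by_cases hj : PySem.Chars.find u ['*', '/'] = -1
        · rw [if_pos hj, if_pos hj]
          simp
        · rw [if_neg hj, if_neg hj]
          have h0j : 0 ≤ PySem.Chars.find u ['*', '/'] := by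
            have := PySem.Chars.neg_one_le_find u ['*', '/']
            omega
          obtain ⟨hsp, -⟩ := PySem.Chars.find_spec h0j
          have hlen2 : (PySem.Chars.find u ['*', '/']).toNat + 2 ≤ u.length := by
            have := hsp.length_le
            simp [List.length_drop] at this
            omega
          rw [ih (u.drop ((PySem.Chars.find u ['*', '/']).toNat + 2))
            (by simp only [List.length_drop]; simp at hs; omega) _]
          have htk : u.take ((PySem.Chars.find u ['*', '/']).toNat + 2)
              = u.take ((PySem.Chars.find u ['*', '/']).toNat) ++ ['*', '/'] := by
            rw [List.take_add]
            congr 1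
            exact (List.prefix_iff_eq_take.mp hsp).symm
          have hpc : pvRstripNL (('/' :: '*' :: u).take ((PySem.Chars.find u ['*', '/']).toNat + 2 + 2))
              = ['/', '*'] ++ u.take ((PySem.Chars.find u ['*', '/']).toNat + 2) := by
            rw [show (PySem.Chars.find u ['*', '/']).toNat + 2 + 2
                = ((PySem.Chars.find u ['*', '/']).toNat + 2 + 1) + 1 from by omega]
            rw [List.take_succ_cons, List.take_succ_cons, htk]
            rw [show '/' :: '*' :: (u.take ((PySem.Chars.find u ['*', '/']).toNat) ++ ['*', '/'])
                = ('/' :: '*' :: u.take ((PySem.Chars.find u ['*', '/']).toNat)) ++ ['*', '/'] from by simp]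
            rw [pv_rstrip_close]
            simp [htk]
          rw [hpc]
          simp
      · rw [pvRun_step_none c rest acc hpre, pvRefA_cons c rest hpre]
        exact ih rest (by simp at hs; omega) acc

lemma pvALoop_eq (fuel : Nat) : ∀ (s : List Char) (k : Nat) (acc : List (List Char)),
    k ≤ s.length → s.length - k < fuel →
    pvALoop s fuel (k : Int) acc = (acc ++ (pvRefA (s.drop k)).1, (pvRefA (s.drop k)).2) := by
  induction fuel with
  | zero =>
    intro s k acc hk hf
    omega
  | succ f ih =>
    intro s k acc hk hf
    simp only [pvALoop]
    by_cases hklen : k < s.length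
    · rw [if_pos (by rw [PySem.Chars.len_eq]; exact_mod_cast hklen)]
      rw [PySem.Chars.findFrom_natCast s ['/', '*'] k (le_of_lt hklen)]
      by_cases hm : PySem.Chars.find (s.drop k) ['/', '*'] = -1
      · rw [if_pos hm, if_pos rfl]
        rw [pvRefA_eq, if_pos hm]
        simp
      · have h0 : 0 ≤ PySem.Chars.find (s.drop k) ['/', '*'] := by
          have := PySem.Chars.neg_one_le_find (s.drop k) ['/', '*']
          omega
        obtain ⟨m, hfm⟩ : ∃ m : Nat, PySem.Chars.find (s.drop k) ['/', '*'] = (m : Int) :=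
          ⟨(PySem.Chars.find (s.drop k) ['/', '*']).toNat, by omega⟩
        rw [if_neg hm, hfm]
        rw [if_neg (by omega : ¬ (k : Int) + (m : Int) = -1)]
        obtain ⟨hsp, -⟩ := PySem.Chars.find_spec h0
        rw [hfm] at hsp
        rw [show ((m : Int)).toNat = m from by omega] at hsp
        have hdd0 : ((s.drop k).drop m) = s.drop (k + m) := by
          rw [List.drop_drop]
        rw [hdd0] at hsp
        have hlen2 : k + m + 2 ≤ s.length := by
          have := hsp.length_le
          simp [List.length_drop] at this
          omega
        rw [show (k : Int) + (m : Int) + 2 = ((k + m + 2 : Nat) : Int) from by push_cast; ring]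
        rw [PySem.Chars.findFrom_natCast s ['*', '/'] (k + m + 2) hlen2]
        have hdd1 : ((s.drop k).drop (m + 2)) = s.drop (k + m + 2) := by
          rw [List.drop_drop, show k + (m + 2) = k + m + 2 from by omega]
        by_cases hj : PySem.Chars.find (s.drop (k + m + 2)) ['*', '/'] = -1
        · rw [if_pos hj, if_pos rfl]
          rw [show ((k : Int) + (m : Int)) = ((k + m : Nat) : Int) from by push_cast; ring]
          rw [show PySem.Chars.slice s (some ((k + m : Nat) : Int)) none = s.drop (k + m) from by
            simp only [PySem.Chars.slice_eq_listSlice, PySem.List.slice_from_natCast]]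
          conv_rhs => rw [pvRefA_eq]
          rw [if_neg hm, hfm]
          rw [show ((m : Int)).toNat = m from by omega]
          rw [hdd0, hdd1, if_pos hj]
        · have h0j : 0 ≤ PySem.Chars.find (s.drop (k + m + 2)) ['*', '/'] := by
            have := PySem.Chars.neg_one_le_find (s.drop (k + m + 2)) ['*', '/']
            omega
          obtain ⟨j, hfj⟩ : ∃ j : Nat, PySem.Chars.find (s.drop (k + m + 2)) ['*', '/'] = (j : Int) :=
            ⟨(PySem.Chars.find (s.drop (k + m + 2)) ['*', '/']).toNat, by omega⟩
          rw [if_neg hj, hfj]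
          rw [if_neg (by omega : ¬ ((k + m + 2 : Nat) : Int) + (j : Int) = -1)]
          obtain ⟨hsp2, -⟩ := PySem.Chars.find_spec h0j
          rw [hfj] at hsp2
          rw [show ((j : Int)).toNat = j from by omega] at hsp2
          have hdd2 : ((s.drop (k + m + 2)).drop j) = s.drop (k + m + 2 + j) := by
            rw [List.drop_drop]
          rw [hdd2] at hsp2
          have hlen3 : k + m + 2 + j + 2 ≤ s.length := by
            have := hsp2.length_le
            simp [List.length_drop] at this
            omega
          rw [show ((k + m + 2 : Nat) : Int) + (j : Int) + 2 = ((k + m + 2 + j + 2 : Nat) : Int)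
            from by push_cast; ring]
          rw [show ((k : Int) + (m : Int)) = ((k + m : Nat) : Int) from by push_cast; ring]
          rw [show PySem.Chars.slice s (some ((k + m : Nat) : Int)) (some ((k + m + 2 + j + 2 : Nat) : Int))
              = (s.drop (k + m)).take ((k + m + 2 + j + 2) - (k + m)) from by
            simp only [PySem.Chars.slice_eq_listSlice, PySem.List.slice_natCast]]
          rw [show (k + m + 2 + j + 2) - (k + m) = j + 2 + 2 from by omega]
          rw [ih s (k + m + 2 + j + 2) _ hlen3 (by omega)]
          conv_rhs => rw [pvRefA_eq]
          rw [if_neg hm, hfm]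
          rw [show ((m : Int)).toNat = m from by omega]
          rw [hdd0, hdd1, if_neg hj, hfj]
          rw [show ((j : Int)).toNat = j from by omega]
          have hdd3 : ((s.drop (k + m + 2)).drop (j + 2)) = s.drop (k + m + 2 + j + 2) := by
            rw [List.drop_drop, show k + m + 2 + (j + 2) = k + m + 2 + j + 2 from by omega]
          rw [hdd3]
          simp
    · rw [if_neg (by rw [PySem.Chars.len_eq]; exact_mod_cast (by omega : ¬ (k : Nat) < s.length))]
      have hnil : s.drop k = [] := List.drop_eq_nil_of_le (by omega)
      rw [hnil, pvRefA_eq, if_pos pv_find_nil_op]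
      simp

-- ===== VERDICT (by name: the statement is the Claim_ definition above) =====
theorem extract_inline_block_comments_spec : Claim_equal_extract_inline_block_comments := by
  intro raw_line _
  show _ = _
  simp only [extract_inline_block_comments, extract_inline_block_comments_alt]
  have hA := pvALoop_eq (raw_line.toList.length + 1) raw_line.toList 0 []
    (by omega) (by omega)
  have hB := pvRun_none raw_line.toList.length raw_line.toList le_rfl []
  simp only [Nat.cast_zero, List.drop_zero, List.nil_append] at hA
  rw [hA, hB]
  simp
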